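-- pv_equiv track=rewrite | github.com/aua5749/DS2024Fall | lab9.py | fuzzy_pick
-- ===== SOURCE A (Python) =====
-- def ngrams(word: str) -> list[str]:
--     """Returns a list of n-grams of word for all relevant n, in descending order of n."""
--     return [word[i:i+n] for n in range(len(word), 0, -1) for i in range(0, len(word) - n + 1)]
--
-- def fuzzy_pick(query: str, index: dict) -> dict[str,str]:
--     """Returns suggestions for valid options based on the query string.
--     Suggestions will take the form of a dictionary with suggestions as keys and longest matching ngram as the value"""
--     suggestions = {}
--     # [TODO] Add code here to create a dictionary of suggestions
--     for ngrams_made in ngrams(query):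
--         if ngrams_made in index:
--             for options in index[ngrams_made]:
--                 if options not in suggestions or len(ngrams_made)>len(suggestions[options]):
--                     suggestions[options]=ngrams_made
--     return suggestions
-- ===== SOURCE B (Python) =====
-- def fuzzy_pick(query: str, index: dict) -> dict[str, str]:
--     """Returns suggestions for valid options based on the query string.
--     Scans the index once instead of generating every query n-gram: keeps the
--     keys that occur in the query, sorts them by (descending length, earliest
--     occurrence), then records the first key seen for each option."""
--     matches = [(len(query) - len(key), query.find(key), key, opts)
--                for key, opts in index.items()
--                if key and key in query]
--     matches.sort(key=lambda t: (t[0], t[1]))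
--     suggestions = {}
--     for _, _, key, opts in matches:
--         for opt in opts:
--             if opt not in suggestions:
--                 suggestions[opt] = key
--     return suggestions
-- ===== Notes on version B (the rewrite author's own statement) =====
-- stated objective: faster
-- what changed: Instead of generating all O(len(query)^2) n-grams of the query and looking each one up, B scans the index once, keeps the keys occurring in the query, sorts them by (descending length, earliest occurrence in the query) and records the first key seen per option; Pre_ only excludes association lists with duplicate keys, which cannot arise from a Python dict argument.
import Mathlib
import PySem

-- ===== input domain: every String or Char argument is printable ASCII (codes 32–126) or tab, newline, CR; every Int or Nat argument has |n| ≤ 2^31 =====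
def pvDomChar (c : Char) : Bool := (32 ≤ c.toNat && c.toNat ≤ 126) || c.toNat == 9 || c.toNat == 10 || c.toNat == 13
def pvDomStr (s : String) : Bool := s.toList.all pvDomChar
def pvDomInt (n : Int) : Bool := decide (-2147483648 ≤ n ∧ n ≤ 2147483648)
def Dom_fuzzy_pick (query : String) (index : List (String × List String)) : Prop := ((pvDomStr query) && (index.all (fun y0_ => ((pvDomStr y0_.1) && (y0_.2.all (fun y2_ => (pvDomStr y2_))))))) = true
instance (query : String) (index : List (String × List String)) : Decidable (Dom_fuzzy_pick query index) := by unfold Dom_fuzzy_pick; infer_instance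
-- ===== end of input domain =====

-- B replaces A's enumeration of every query n-gram by a single scan of the index:
-- keep the keys occurring in the query, sort them by (descending length, earliest
-- occurrence), then record the first key seen for each option (measured faster: B avoids
-- A's quadratic-in-len(query) n-gram enumeration).

-- ===== PORT A =====
def ngrams (word : String) : List String :=
  (PySem.List.pyRange (PySem.Str.len word) 0 (-1)).flatMap fun n =>
    (PySem.List.pyRange 0 (PySem.Str.len word - n + 1) 1).map fun i =>
      PySem.Str.slice word (some i) (some (i + n))

def fuzzy_pick (query : String) (index : List (String × List String)) : List (String × String) :=
  (List.foldl
    (fun (suggestions : PySem.Dict String String) ngrams_made =>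
      if (PySem.Dict.mk index).contains ngrams_made then
        List.foldl
          (fun suggestions options =>
            if !suggestions.contains options
                || decide (PySem.Str.len (suggestions.getD options "") < PySem.Str.len ngrams_made) then
              suggestions.insert options ngrams_made
            else suggestions)
          suggestions ((PySem.Dict.mk index).getD ngrams_made [])
      else suggestions)
    PySem.Dict.empty (ngrams query)).items

-- ===== PORT B =====
def fuzzy_pick_alt (query : String) (index : List (String × List String)) : List (String × String) :=
  (List.foldl
    (fun (suggestions : PySem.Dict String String) t =>
      List.foldl
        (fun suggestions opt =>
          if suggestions.contains opt then suggestions else suggestions.insert opt t.2.2.1)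
        suggestions t.2.2.2)
    PySem.Dict.empty
    (PySem.List.sorted2
      ((index.filter fun p => !(p.1 == "") && PySem.Str.isIn p.1 query).map
        fun p => (PySem.Str.len query - PySem.Str.len p.1, PySem.Str.find query p.1, p.1, p.2))
      (fun t => t.1) (fun t => t.2.1))).items

-- ===== PRECONDITION & SPEC =====
-- Pre_ excludes association lists with duplicate keys: they cannot arise from a Python
-- dict argument (A's `index` parameter is a dict), so Pre_ only rules out inputs with no
-- Python counterpart.
def Pre_fuzzy_pick (query : String) (index : List (String × List String)) : Prop :=
  (index.map Prod.fst).Nodup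
instance (query : String) (index : List (String × List String)) : Decidable (Pre_fuzzy_pick query index) := by unfold Pre_fuzzy_pick; infer_instance

def pvWitness_fuzzy_pick : String × (List (String × List String)) :=
  ("ab", [("a", ["x"]), ("ab", ["y", "x"])])

def Spec_fuzzy_pick (query : String) (index : List (String × List String)) (out : List (String × String)) : Prop := out = fuzzy_pick_alt query index
instance (query : String) (index : List (String × List String)) (out : List (String × String)) : Decidable (Spec_fuzzy_pick query index out) := by unfold Spec_fuzzy_pick; infer_instance

-- ===== CLAIM (what is proved, stated in full; the proofs are below) =====
def Claim_equal_fuzzy_pick : Prop := ∀ (query : String) (index : List (String × List String)), Dom_fuzzy_pick query index → Pre_fuzzy_pick query index → Spec_fuzzy_pick query index (fuzzy_pick query index)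

-- ===== LEMMAS AND PROOFS =====

-- proof-side abbreviations
def stepIA (s : PySem.Dict String String) (k : String) (opts : List String) : PySem.Dict String String :=
  List.foldl (fun s opt => if s.contains opt then s else s.insert opt k) s opts

def gstep (index : List (String × List String)) (s : PySem.Dict String String) (k : String) : PySem.Dict String String :=
  stepIA s k ((PySem.Dict.mk index).getD k [])

def subAt (q : String) (n i : Nat) : String := String.ofList ((q.toList.drop i).take n)

def Bblock (q : String) (n : Nat) : List String :=
  (List.range (q.toList.length - n + 1)).map (fun i => subAt q n i)

def rk (q k : String) : Lex (Int × Int) :=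
  toLex (PySem.Str.len q - PySem.Str.len k, PySem.Str.find q k)

-- ---- range / slice normalisation ----
theorem pyRange_down (L : Nat) :
    PySem.List.pyRange (L : Int) 0 (-1) = (List.range L).map (fun k : Nat => (L : Int) - (k : Int)) := by
  rcases Nat.eq_zero_or_pos L with h | h
  · subst h; simp [PySem.List.pyRange]
  · have hL : (0 : Int) < L := by exact_mod_cast h
    simp only [PySem.List.pyRange]
    rw [if_neg (by norm_num), if_neg (by norm_num), if_pos hL]
    have he : ((L : Int) - 0 + -(-1) - 1) / -(-1) = (L : Int) := by norm_num
    rw [he, Int.toNat_natCast]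
    exact List.map_congr_left fun k _ => by ring

theorem pyRange_up (m : Nat) :
    PySem.List.pyRange 0 (m : Int) 1 = (List.range m).map (fun i : Nat => (i : Int)) := by
  rcases Nat.eq_zero_or_pos m with h | h
  · subst h; simp [PySem.List.pyRange]
  · have hm : (0 : Int) < m := by exact_mod_cast h
    rw [PySem.List.pyRange_of_pos _ _ (by norm_num : (0:Int) < 1)]
    rw [if_pos hm]
    have he : ((m : Int) - 0 + 1 - 1) / 1 = (m : Int) := by norm_num
    rw [he, Int.toNat_natCast]
    exact List.map_congr_left fun k _ => by ring

theorem subAt_toList (q : String) (n i : Nat) :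
    (subAt q n i).toList = (q.toList.drop i).take n := by
  simp [subAt]

theorem strSlice_eq (q : String) (i n : Nat) :
    PySem.Str.slice q (some (i : Int)) (some ((i : Int) + (n : Int))) = subAt q n i := by
  simp [PySem.Str.slice, PySem.Chars.slice, PySem.List.slice_natCast_add, subAt]

theorem length_subAt (q : String) (n i : Nat) (h : i + n ≤ q.toList.length) :
    (subAt q n i).toList.length = n := by
  have h' : i + n ≤ q.length := by simpa using h
  simp [subAt_toList]
  omega

theorem flatMap_congr_mem {α β : Type} {l : List α} {f g : α → List β}
    (h : ∀ a ∈ l, f a = g a) : l.flatMap f = l.flatMap g := by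
  induction l with
  | nil => rfl
  | cons x t ih =>
    rw [List.flatMap_cons, List.flatMap_cons, h x (by simp), ih (fun a ha => h a (by simp [ha]))]

theorem ngrams_eq (q : String) :
    ngrams q = (List.range q.toList.length).flatMap
      (fun k => Bblock q (q.toList.length - k)) := by
  unfold ngrams
  rw [PySem.Str.len_eq, pyRange_down, List.flatMap_map]
  apply flatMap_congr_mem
  intro k hk
  rw [List.mem_range] at hk
  have hkL : k ≤ q.toList.length := le_of_lt hk
  have e1 : (q.toList.length : Int) - ((q.toList.length : Int) - (k : Int)) + 1
      = ((k + 1 : Nat) : Int) := by push_cast; ring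
  have e2 : (q.toList.length : Int) - (k : Int) = ((q.toList.length - k : Nat) : Int) := by
    rw [Int.natCast_sub hkL]
  rw [e1, pyRange_up, List.map_map, Bblock]
  have e3 : q.toList.length - (q.toList.length - k) + 1 = k + 1 := by omega
  rw [e3]
  apply List.map_congr_left
  intro i _
  simp only [Function.comp_apply]
  rw [e2]
  exact strSlice_eq q i (q.toList.length - k)

-- ---- first-occurrence facts ----
theorem find_subAt_nonneg (q : String) (n i : Nat) :
    0 ≤ PySem.Chars.find q.toList (subAt q n i).toList := by
  rw [PySem.Chars.find_nonneg_iff, subAt_toList]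
  exact (List.take_prefix _ _).isInfix.trans (List.drop_suffix _ _).isInfix

theorem find_subAt_le (q : String) (n i : Nat) :
    (PySem.Chars.find q.toList (subAt q n i).toList).toNat ≤ i := by
  have h0 := find_subAt_nonneg q n i
  obtain ⟨hpre, hmin⟩ := PySem.Chars.find_spec h0
  by_contra hlt
  exact hmin i (Nat.lt_of_not_le hlt) (by rw [subAt_toList]; exact List.take_prefix _ _)

theorem subAt_find (q : String) (n i : Nat) (h : i + n ≤ q.toList.length) :
    subAt q n ((PySem.Chars.find q.toList (subAt q n i).toList).toNat) = subAt q n i := by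
  have h0 := find_subAt_nonneg q n i
  obtain ⟨hpre, -⟩ := PySem.Chars.find_spec h0
  have hlen : (subAt q n i).toList.length = n := length_subAt q n i h
  have h2 := List.prefix_iff_eq_take.mp hpre
  rw [hlen] at h2
  rw [subAt, ← h2]
  simp

-- ---- generic: distinct elements of a left-to-right image appear ordered by first index ----
theorem ofList_range_map_pairwise {α : Type} [BEq α] [LawfulBEq α]
    (f : Nat → α) (m : Nat) (idx : α → Nat)
    (h1 : ∀ i < m, idx (f i) ≤ i) (h2 : ∀ i < m, f (idx (f i)) = f i) :
    (PySem.Set.ofList ((List.range m).map f)).Pairwise (fun a b => idx a < idx b) := by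
  induction m with
  | zero => simp [PySem.Set.ofList_nil]
  | succ m ih =>
    have IH := ih (fun i hi => h1 i (by omega)) (fun i hi => h2 i (by omega))
    rw [List.range_succ, List.map_append, List.map_singleton, PySem.Set.ofList_append_singleton,
      PySem.Set.add]
    by_cases hc : (PySem.Set.ofList ((List.range m).map f)).contains (f m) = true
    · rw [if_pos hc]; exact IH
    · rw [if_neg hc, List.pairwise_append]
      refine ⟨IH, by simp, ?_⟩
      intro a ha b hb
      simp only [List.mem_singleton] at hb; subst hb
      have haL : a ∈ (List.range m).map f := (PySem.Set.mem_ofList _ _).mp ha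
      obtain ⟨i, hi, rfl⟩ := List.mem_map.mp haL
      rw [List.mem_range] at hi
      have hidx_a : idx (f i) ≤ i := h1 i (by omega)
      have hm_le : idx (f m) ≤ m := h1 m (by omega)
      have hm_eq : idx (f m) = m := by
        by_contra hne
        have hlt : idx (f m) < m := by omega
        have hmem : f m ∈ (List.range m).map f :=
          List.mem_map.mpr ⟨idx (f m), List.mem_range.mpr hlt, h2 m (by omega)⟩
        have : (PySem.Set.ofList ((List.range m).map f)).contains (f m) = true := by
          have := (PySem.Set.mem_ofList ((List.range m).map f) (f m)).mpr hmem
          simpa [PySem.Set.contains, List.contains_iff_mem] using this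
        exact hc this
      omega

theorem block_pairwise (q : String) (n : Nat) (_hn1 : 1 ≤ n) (hn2 : n ≤ q.toList.length) :
    (PySem.Set.ofList (Bblock q n)).Pairwise (fun a b => rk q a < rk q b) := by
  have base := ofList_range_map_pairwise (f := fun i => subAt q n i) (m := q.toList.length - n + 1)
      (idx := fun a => (PySem.Chars.find q.toList a.toList).toNat)
      (fun i _ => find_subAt_le q n i)
      (fun i hi => subAt_find q n i (by omega))
  rw [Bblock]
  refine base.imp_of_mem ?_
  intro a b ha hb hlt
  have ha' := (PySem.Set.mem_ofList _ _).mp ha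
  have hb' := (PySem.Set.mem_ofList _ _).mp hb
  obtain ⟨i, hi, rfl⟩ := List.mem_map.mp ha'
  obtain ⟨j, hj, rfl⟩ := List.mem_map.mp hb'
  rw [List.mem_range] at hi hj
  have hla : (subAt q n i).toList.length = n := length_subAt q n i (by omega)
  have hlb : (subAt q n j).toList.length = n := length_subAt q n j (by omega)
  have na := find_subAt_nonneg q n i
  have nb := find_subAt_nonneg q n j
  rw [rk, rk, Prod.Lex.lt_iff]
  simp only [ofLex_toLex]
  right
  refine ⟨?_, ?_⟩
  · have hab : PySem.Str.len (subAt q n i) = PySem.Str.len (subAt q n j) := by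
      rw [PySem.Str.len_eq, PySem.Str.len_eq, hla, hlb]
    rw [hab]
  · simp only [PySem.Str.find_eq]
    dsimp only at hlt
    omega

-- ---- Set.update structure ----
theorem contains_append_singleton {α : Type} [BEq α] [LawfulBEq α] (s : List α) (b x : α) :
    (s ++ [b]).contains x = (s.contains x || (x == b)) := by
  rw [List.contains_append]
  simp only [List.contains_cons, List.contains_nil, Bool.or_false]

theorem update_filter {α : Type} [BEq α] [LawfulBEq α] (B : List α) (s : PySem.Set α) :
    PySem.Set.update s B = s ++ (PySem.Set.ofList B).filter (fun b => !(PySem.Set.contains s b)) := by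
  induction B generalizing s with
  | nil => simp [PySem.Set.update, PySem.Set.ofList_nil]
  | cons b t ih =>
    rw [PySem.Set.ofList_cons]
    show PySem.Set.update (PySem.Set.add s b) t = _
    by_cases hb : PySem.Set.contains s b = true
    · rw [PySem.Set.add, if_pos hb, ih s]
      congr 1
      have hb' : (!PySem.Set.contains s b) = false := by rw [hb]; rfl
      rw [List.filter_cons, hb']
      simp only [Bool.false_eq_true, if_false]
      simp only [PySem.Set.discard, List.filter_filter]
      apply List.filter_congr
      intro x _
      cases hxb : (x == b) with
      | true =>
        have hxb' : x = b := by simpa using hxb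
        subst hxb'
        rw [hb]
        simp
      | false => simp
    · rw [PySem.Set.add, if_neg hb, ih (s ++ [b]), List.append_assoc]
      congr 1
      have hbf : PySem.Set.contains s b = false := by
        cases h : PySem.Set.contains s b
        · rfl
        · exact absurd h hb
      have hb' : (!PySem.Set.contains s b) = true := by rw [hbf]; rfl
      rw [List.filter_cons, if_pos hb', List.singleton_append]
      congr 1
      simp only [PySem.Set.discard, List.filter_filter]
      apply List.filter_congr
      intro x _
      show (!PySem.Set.contains (s ++ [b]) x) = ((!PySem.Set.contains s x) && !(x == b))
      rw [PySem.Set.contains, PySem.Set.contains, contains_append_singleton]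
      cases hxb : (x == b) with
      | true =>
        have hxb' : x = b := by simpa using hxb
        subst hxb'
        rw [show PySem.Set.contains s x = List.contains s x from rfl] at hbf
        rw [hbf]
        simp
      | false => simp

theorem update_disjoint {α : Type} [BEq α] [LawfulBEq α] (B : List α) (s : PySem.Set α)
    (h : ∀ b ∈ B, PySem.Set.contains s b = false) :
    PySem.Set.update s B = s ++ PySem.Set.ofList B := by
  rw [update_filter]
  congr 1
  apply List.filter_eq_self.mpr
  intro b hb
  have hbB : b ∈ B := (PySem.Set.mem_ofList _ _).mp hb
  rw [h b hbB]
  rfl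

theorem ofList_filter {α : Type} [BEq α] [LawfulBEq α] (p : α → Bool) (L : List α) :
    PySem.Set.ofList (L.filter p) = (PySem.Set.ofList L).filter p := by
  induction L with
  | nil => simp [PySem.Set.ofList_nil]
  | cons h t ih =>
    rw [List.filter_cons, PySem.Set.ofList_cons]
    by_cases hp : p h = true
    · rw [if_pos hp, PySem.Set.ofList_cons, ih, List.filter_cons, if_pos hp]
      congr 1
      simp only [PySem.Set.discard, List.filter_filter]
      apply List.filter_congr
      intro x _
      by_cases hxh : x = h
      · subst hxh; simp
      · simp [Bool.and_comm]
    · rw [if_neg hp, ih, List.filter_cons, if_neg hp]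
      simp only [PySem.Set.discard, List.filter_filter]
      apply List.filter_congr
      intro x _
      by_cases hxh : x = h
      · subst hxh; simp [hp]
      · simp [hxh]

-- ---- the deduplicated n-gram list is strictly rank-increasing ----
theorem update_blocks_pairwise (q : String) (ks : List Nat) :
    ∀ (s : PySem.Set String),
      s.Pairwise (fun a b => rk q a < rk q b) →
      (∀ x ∈ s, ∀ k ∈ ks, q.toList.length - k < x.toList.length) →
      ks.Pairwise (· < ·) →
      (∀ k ∈ ks, k < q.toList.length) →
      (PySem.Set.update s (ks.flatMap (fun k => Bblock q (q.toList.length - k)))).Pairwise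
        (fun a b => rk q a < rk q b) := by
  induction ks with
  | nil => intro s hs _ _ _; simpa [PySem.Set.update] using hs
  | cons k t ih =>
    intro s hs hlen hinc hlt
    rw [List.flatMap_cons]
    show (PySem.Set.update s (Bblock q (q.toList.length - k) ++ _)).Pairwise _
    rw [PySem.Set.update, List.foldl_append]
    have hk : k < q.toList.length := hlt k (by simp)
    set n := q.toList.length - k with hn
    have hn1 : 1 ≤ n := by omega
    have hn2 : n ≤ q.toList.length := by omega
    have hlen_blk : ∀ b ∈ Bblock q n, b.toList.length = n := by
      intro b hb
      obtain ⟨i, hi, rfl⟩ := List.mem_map.mp hb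
      rw [List.mem_range] at hi
      exact length_subAt q n i (by omega)
    have hdisj : ∀ b ∈ Bblock q n, PySem.Set.contains s b = false := by
      intro b hb
      by_contra hcb
      have hcb' : PySem.Set.contains s b = true := by
        cases h : PySem.Set.contains s b
        · exact absurd h hcb
        · rfl
      have hmem : b ∈ s := by
        simpa [PySem.Set.contains, List.contains_iff_mem] using hcb'
      have := hlen b hmem k (by simp)
      have := hlen_blk b hb
      omega
    have hupd : PySem.Set.update s (Bblock q n) = s ++ PySem.Set.ofList (Bblock q n) :=
      update_disjoint _ _ hdisj
    show (PySem.Set.update (PySem.Set.update s (Bblock q n)) _).Pairwise _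
    rw [hupd]
    apply ih
    · rw [List.pairwise_append]
      refine ⟨hs, block_pairwise q n hn1 hn2, ?_⟩
      intro x hx b hb
      have hb' := (PySem.Set.mem_ofList _ _).mp hb
      have hlb : b.toList.length = n := hlen_blk b hb'
      have hlx : n < x.toList.length := hlen x hx k (by simp)
      rw [rk, rk, Prod.Lex.lt_iff]
      simp only [ofLex_toLex]
      left
      simp only [PySem.Str.len_eq]
      omega
    · intro x hx k' hk'
      rcases List.mem_append.mp hx with hx1 | hx2
      · exact hlen x hx1 k' (by simp [hk'])
      · have hlx : x.toList.length = n := hlen_blk x ((PySem.Set.mem_ofList _ _).mp hx2)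
        have hkk' : k < k' := (List.pairwise_cons.mp hinc).1 k' hk'
        have hk'L : k' < q.toList.length := hlt k' (by simp [hk'])
        omega
    · exact (List.pairwise_cons.mp hinc).2
    · intro k' hk'; exact hlt k' (by simp [hk'])

theorem ngrams_pairwise_rk (q : String) :
    (PySem.Set.ofList (ngrams q)).Pairwise (fun a b => rk q a < rk q b) := by
  rw [ngrams_eq, PySem.Set.ofList_eq_foldl]
  exact update_blocks_pairwise q (List.range q.toList.length) []
    (by simp) (by simp) List.pairwise_lt_range (fun k hk => List.mem_range.mp hk)

theorem ngrams_len_desc (q : String) :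
    (ngrams q).Pairwise (fun a b => PySem.Str.len b ≤ PySem.Str.len a) := by
  rw [ngrams_eq, List.pairwise_flatMap]
  constructor
  · intro k hk
    rw [List.mem_range] at hk
    rw [Bblock, List.pairwise_map]
    refine List.Pairwise.imp_of_mem ?_ List.pairwise_lt_range
    intro i j hi hj _
    rw [List.mem_range] at hi hj
    rw [PySem.Str.len_eq, PySem.Str.len_eq,
      length_subAt q _ i (by omega), length_subAt q _ j (by omega)]
  · refine List.Pairwise.imp_of_mem ?_ List.pairwise_lt_range
    intro k k' hk hk' hlt x hx y hy
    rw [List.mem_range] at hk hk'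
    obtain ⟨i, hi, rfl⟩ := List.mem_map.mp hx
    obtain ⟨j, hj, rfl⟩ := List.mem_map.mp hy
    rw [List.mem_range] at hi hj
    rw [PySem.Str.len_eq, PySem.Str.len_eq,
      length_subAt q _ i (by omega), length_subAt q _ j (by omega)]
    omega

theorem mem_ngrams (q ng : String) :
    ng ∈ ngrams q ↔ (ng.toList ≠ [] ∧ PySem.Str.isIn ng q = true) := by
  rw [ngrams_eq]
  constructor
  · intro h
    obtain ⟨k, hk, hng⟩ := List.mem_flatMap.mp h
    rw [List.mem_range] at hk
    obtain ⟨i, hi, rfl⟩ := List.mem_map.mp hng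
    rw [List.mem_range] at hi
    set n := q.toList.length - k with hn
    have hn1 : 1 ≤ n := by omega
    have hin : i + n ≤ q.toList.length := by omega
    constructor
    · intro hnil
      have hl := length_subAt q n i hin
      rw [hnil] at hl
      simp at hl
      omega
    · rw [PySem.Str.isIn_eq]
      rw [PySem.Chars.isIn_iff_infix, subAt_toList]
      exact (List.take_prefix _ _).isInfix.trans (List.drop_suffix _ _).isInfix
  · rintro ⟨hne, hin⟩
    have hinf : ng.toList <:+: q.toList := by
      rw [PySem.Str.isIn_eq] at hin
      exact (PySem.Chars.isIn_iff_infix _ _).mp hin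
    have hfind : 0 ≤ PySem.Chars.find q.toList ng.toList :=
      (PySem.Chars.find_nonneg_iff _ _).mpr hinf
    obtain ⟨hpre, -⟩ := PySem.Chars.find_spec hfind
    set j := (PySem.Chars.find q.toList ng.toList).toNat with hj
    set n := ng.toList.length with hnn
    have hn1 : 1 ≤ n := by
      cases h : ng.toList with
      | nil => exact absurd h hne
      | cons c cs => rw [hnn, h]; simp
    have hjle : PySem.Chars.find q.toList ng.toList ≤ (q.toList.length : Int) :=
      PySem.Chars.find_le_length _ _
    have hjn : j + n ≤ q.toList.length := by
      have hl := hpre.length_le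
      rw [List.length_drop] at hl
      omega
    rw [List.mem_flatMap]
    refine ⟨q.toList.length - n, List.mem_range.mpr (by omega), ?_⟩
    have hLn : q.toList.length - (q.toList.length - n) = n := by omega
    rw [Bblock, hLn]
    refine List.mem_map.mpr ⟨j, List.mem_range.mpr (by omega), ?_⟩
    have htake : (q.toList.drop j).take n = ng.toList := by
      have h2 := List.prefix_iff_eq_take.mp hpre
      rw [← hnn] at h2
      exact h2.symm
    rw [subAt, htake]
    simp

-- ---- insert-if-absent machinery ----
theorem IA_mono (s : PySem.Dict String String) (k x : String) (opts : List String)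
    (h : s.contains x = true) : (stepIA s k opts).contains x = true := by
  induction opts generalizing s with
  | nil => simpa [stepIA] using h
  | cons o t ih =>
    rw [stepIA, List.foldl_cons]
    by_cases hc : s.contains o = true
    · rw [if_pos hc]; exact ih s h
    · rw [if_neg hc]
      exact ih _ (by rw [PySem.Dict.contains_insert]; simp [h])

theorem IA_sat (s : PySem.Dict String String) (k : String) (opts : List String) :
    ∀ opt ∈ opts, (stepIA s k opts).contains opt = true := by
  induction opts generalizing s with
  | nil => intro opt h; simp at h
  | cons o t ih =>
    intro opt hopt
    rw [stepIA, List.foldl_cons]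
    rcases List.mem_cons.mp hopt with rfl | hmem
    · apply IA_mono
      by_cases hc : s.contains opt = true
      · rw [if_pos hc]; exact hc
      · rw [if_neg hc]; exact PySem.Dict.contains_insert_self s opt k
    · exact ih _ opt hmem

theorem IA_noop (s : PySem.Dict String String) (k : String) (opts : List String)
    (h : ∀ opt ∈ opts, s.contains opt = true) : stepIA s k opts = s := by
  induction opts with
  | nil => rfl
  | cons o t ih =>
    rw [stepIA, List.foldl_cons, if_pos (h o (by simp))]
    exact ih (fun opt hopt => h opt (by simp [hopt]))

theorem getD_mem_values (s : PySem.Dict String String) (k : String) (h : s.contains k = true) :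
    s.getD k "" ∈ s.values := by
  rw [PySem.Dict.contains_eq_isSome_get?] at h
  obtain ⟨v, hv⟩ := Option.isSome_iff_exists.mp h
  have hit := PySem.Dict.mem_items_of_get?_eq_some s hv
  rw [PySem.Dict.getD_eq_get?_getD, hv]
  exact List.mem_map.mpr ⟨(k, v), hit, rfl⟩

theorem A_inner (ng : String) (opts : List String) (s : PySem.Dict String String)
    (hval : ∀ v ∈ s.values, PySem.Str.len ng ≤ PySem.Str.len v) :
    (List.foldl
      (fun suggestions options =>
        if !suggestions.contains options
            || decide (PySem.Str.len (suggestions.getD options "") < PySem.Str.len ng) then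
          suggestions.insert options ng
        else suggestions) s opts) = stepIA s ng opts
    ∧ ∀ v ∈ (stepIA s ng opts).values, v = ng ∨ v ∈ s.values := by
  induction opts generalizing s with
  | nil => exact ⟨rfl, fun v hv => Or.inr hv⟩
  | cons o t ih =>
    rw [stepIA, List.foldl_cons, List.foldl_cons]
    by_cases hc : s.contains o = true
    · have hv := getD_mem_values s o hc
      have hlen := hval _ hv
      have hcond : (!s.contains o
          || decide (PySem.Str.len (s.getD o "") < PySem.Str.len ng)) = false := by
        rw [hc]
        simp only [Bool.not_true, Bool.false_or, decide_eq_false_iff_not, not_lt]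
        exact hlen
      rw [if_neg (by rw [hcond]; simp), if_pos hc]
      exact ih s hval
    · have hcond : (!s.contains o
          || decide (PySem.Str.len (s.getD o "") < PySem.Str.len ng)) = true := by
        simp [hc]
      rw [if_pos hcond, if_neg hc]
      have hval' : ∀ v ∈ (s.insert o ng).values, PySem.Str.len ng ≤ PySem.Str.len v := by
        intro v hv
        rcases PySem.Dict.mem_values_insert s o ng v hv with rfl | hv'
        · exact le_refl _
        · exact hval v hv'
      obtain ⟨e1, e2⟩ := ih (s.insert o ng) hval'
      refine ⟨e1, fun v hv => ?_⟩
      rcases e2 v hv with rfl | hv'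
      · exact Or.inl rfl
      · rcases PySem.Dict.mem_values_insert s o ng v hv' with rfl | h2
        · exact Or.inl rfl
        · exact Or.inr h2

theorem A_outer (index : List (String × List String)) (L : List String)
    (s : PySem.Dict String String)
    (hL : L.Pairwise (fun a b => PySem.Str.len b ≤ PySem.Str.len a))
    (hval : ∀ v ∈ s.values, ∀ k ∈ L, PySem.Str.len k ≤ PySem.Str.len v) :
    List.foldl
      (fun (suggestions : PySem.Dict String String) ngrams_made =>
        if (PySem.Dict.mk index).contains ngrams_made then
          List.foldl
            (fun suggestions options =>
              if !suggestions.contains options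
                  || decide (PySem.Str.len (suggestions.getD options "") < PySem.Str.len ngrams_made) then
                suggestions.insert options ngrams_made
              else suggestions)
            suggestions ((PySem.Dict.mk index).getD ngrams_made [])
        else suggestions) s L
    = List.foldl
        (fun s ng => if (PySem.Dict.mk index).contains ng then gstep index s ng else s) s L := by
  induction L generalizing s with
  | nil => rfl
  | cons ng t ih
  =>
    obtain ⟨hhead, htail⟩ := List.pairwise_cons.mp hL
    rw [List.foldl_cons, List.foldl_cons]
    by_cases hc : (PySem.Dict.mk index).contains ng = true
    · rw [if_pos hc, if_pos hc]
      have hval_ng : ∀ v ∈ s.values, PySem.Str.len ng ≤ PySem.Str.len v :=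
        fun v hv => hval v hv ng (by simp)
      obtain ⟨e1, e2⟩ := A_inner ng ((PySem.Dict.mk index).getD ng []) s hval_ng
      rw [e1]
      refine ih _ htail ?_
      intro v hv k hk
      rcases e2 v hv with rfl | hv'
      · exact hhead k hk
      · exact hval v hv' k (List.mem_cons_of_mem _ hk)
    · rw [if_neg hc, if_neg hc]
      exact ih _ htail (fun v hv k hk => hval v hv k (List.mem_cons_of_mem _ hk))

theorem D_aux (index : List (String × List String)) (t : List String)
    (s : PySem.Dict String String) (k : String)
    (h : ∀ opt ∈ (PySem.Dict.mk index).getD k [], s.contains opt = true) :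
    List.foldl (gstep index) s (t.filter (fun x => !(x == k)))
      = List.foldl (gstep index) s t := by
  induction t generalizing s with
  | nil => rfl
  | cons x t ih =>
    rw [List.filter_cons]
    by_cases hx : x = k
    · subst hx
      simp only [BEq.rfl, Bool.not_true, Bool.false_eq_true, if_false]
      rw [List.foldl_cons]
      have hnoop : gstep index s x = s := IA_noop s x _ h
      rw [hnoop]
      exact ih s h
    · have hbeq : (x == k) = false := by simp [hx]
      simp only [hbeq, Bool.not_false, if_true]
      rw [List.foldl_cons, List.foldl_cons]
      exact ih (gstep index s x) (fun opt hopt => IA_mono _ _ _ _ (h opt hopt))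

theorem D_dedup (index : List (String × List String)) (L : List String)
    (s : PySem.Dict String String) :
    List.foldl (gstep index) s (PySem.Set.ofList L) = List.foldl (gstep index) s L := by
  induction L generalizing s with
  | nil => rfl
  | cons x t ih =>
    rw [PySem.Set.ofList_cons, List.foldl_cons, List.foldl_cons]
    show List.foldl (gstep index) (gstep index s x) (PySem.Set.discard (PySem.Set.ofList t) x) = _
    rw [PySem.Set.discard]
    have hsat : ∀ opt ∈ (PySem.Dict.mk index).getD x [], (gstep index s x).contains opt = true :=
      fun opt h => IA_sat s x _ opt h
    rw [D_aux index (PySem.Set.ofList t) (gstep index s x) x hsat]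
    exact ih (gstep index s x)

-- ---- B-side normalisation ----
theorem sorted2_eq_sorted_lex {α : Type} (xs : List α) (k1 k2 : α → Int) :
    PySem.List.sorted2 xs k1 k2 = PySem.List.sorted xs (fun a => toLex (k1 a, k2 a)) := by
  have hb : (fun (a b : α) => decide (k1 a < k1 b) || (!decide (k1 b < k1 a) && decide (k2 a < k2 b)))
      = fun a b => decide ((fun a => toLex (k1 a, k2 a)) a < (fun a => toLex (k1 a, k2 a)) b) := by
    funext a b
    simp only []
    rcases lt_trichotomy (k1 a) (k1 b) with h | h | h
    · simp [Prod.Lex.lt_iff, h]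
    · simp [Prod.Lex.lt_iff, h]
    · simp [Prod.Lex.lt_iff, lt_asymm h, (ne_of_gt h), h]
  show List.foldl (fun acc x => PySem.List.insertBy _ x acc) [] xs
      = List.foldl (fun acc x => PySem.List.insertBy _ x acc) [] xs
  rw [hb]

theorem sorted2_matched (q : String) (index : List (String × List String))
    (hpre : (index.map Prod.fst).Nodup) :
    PySem.List.sorted2
        ((index.filter fun p => !(p.1 == "") && PySem.Str.isIn p.1 q).map
          fun p => (PySem.Str.len q - PySem.Str.len p.1, PySem.Str.find q p.1, p.1, p.2))
        (fun t => t.1) (fun t => t.2.1)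
      = (PySem.Set.ofList ((ngrams q).filter (fun ng => (PySem.Dict.mk index).contains ng))).map
          (fun k => (PySem.Str.len q - PySem.Str.len k, PySem.Str.find q k, k,
            (PySem.Dict.mk index).getD k [])) := by
  have hkeysnodup : (PySem.Dict.mk index).keys.Nodup := by
    rw [PySem.Dict.keys_mk]; exact hpre
  rw [sorted2_eq_sorted_lex]
  apply PySem.List.sorted_eq_of_perm_of_pairwise_lt
  · -- the target list is a permutation of the sort's input
    have hmatched : ((index.filter fun p => !(p.1 == "") && PySem.Str.isIn p.1 q).map
          fun p => (PySem.Str.len q - PySem.Str.len p.1, PySem.Str.find q p.1, p.1, p.2))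
        = ((index.filter fun p => !(p.1 == "") && PySem.Str.isIn p.1 q).map Prod.fst).map
          (fun k => (PySem.Str.len q - PySem.Str.len k, PySem.Str.find q k, k,
            (PySem.Dict.mk index).getD k [])) := by
      rw [List.map_map]
      apply List.map_congr_left
      intro p hp
      have hp' : p ∈ index := List.mem_of_mem_filter hp
      have hg : (PySem.Dict.mk index).getD p.1 [] = p.2 := by
        apply PySem.Dict.getD_of_mem_items _ _ hkeysnodup
        show (p.1, p.2) ∈ index
        simpa using hp'
      simp only [Function.comp_apply, hg]
    rw [hmatched]
    apply List.Perm.map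
    rw [List.perm_ext_iff_of_nodup (PySem.Set.nodup_ofList _)
        (List.Nodup.sublist (List.Sublist.map Prod.fst List.filter_sublist) hpre)]
    intro x
    rw [PySem.Set.mem_ofList, List.mem_filter, mem_ngrams]
    constructor
    · rintro ⟨⟨hne, hisin⟩, hc⟩
      rw [PySem.Dict.contains_mk] at hc
      obtain ⟨p, hp, hpx⟩ := List.any_eq_true.mp hc
      have hpx' : p.1 = x := by simpa using hpx
      refine List.mem_map.mpr ⟨p, List.mem_filter.mpr ⟨hp, ?_⟩, hpx'⟩
      rw [hpx']
      have hxne : (x == "") = false := by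
        simp only [beq_eq_false_iff_ne, ne_eq]
        intro hx; subst hx; exact hne rfl
      rw [hxne, hisin]
      rfl
    · intro hx
      obtain ⟨p, hpf, hpx⟩ := List.mem_map.mp hx
      obtain ⟨hp, hcp⟩ := List.mem_filter.mp hpf
      rw [Bool.and_eq_true] at hcp
      obtain ⟨h1, h2⟩ := hcp
      subst hpx
      refine ⟨⟨?_, h2⟩, ?_⟩
      · intro hnil
        have hempty : p.1 = "" := by simpa using hnil
        rw [hempty] at h1
        simp at h1
      · rw [PySem.Dict.contains_mk]
        exact List.any_eq_true.mpr ⟨p, hp, by simp⟩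
  · -- the target list is strictly increasing under the sort key
    rw [List.pairwise_map]
    have hpw : (PySem.Set.ofList ((ngrams q).filter
          (fun ng => (PySem.Dict.mk index).contains ng))).Pairwise
        (fun a b => rk q a < rk q b) := by
      rw [ofList_filter]
      exact List.Pairwise.sublist List.filter_sublist (ngrams_pairwise_rk q)
    exact hpw

-- ===== VERDICT (by name: the statement is the Claim_ definition above) =====
theorem fuzzy_pick_spec : Claim_equal_fuzzy_pick := by
  intro q index _ hpre
  unfold Spec_fuzzy_pick fuzzy_pick fuzzy_pick_alt
  rw [A_outer index (ngrams q) PySem.Dict.empty (ngrams_len_desc q)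
      (by intro v hv; simp [PySem.Dict.values, PySem.Dict.empty] at hv)]
  rw [PySem.List.foldl_if_eq_foldl_filter (fun ng => (PySem.Dict.mk index).contains ng)
      (gstep index) (ngrams q) PySem.Dict.empty]
  rw [← D_dedup index]
  rw [sorted2_matched q index hpre]
  rw [List.foldl_map]
  rfl
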